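-- pv_equiv track=rewrite | github.com/Shiyu-Lu/Courseworks | Data Structure and Algorithm/Homework1/K03_2.py | offset
-- ===== SOURCE A (Python) =====
-- class Stack(object):
--
--     def __init__(self):
--         self.items = []
--
--     def push(self, data):
--         self.items.append(data)
--
--     def pop(self):
--         return self.items.pop()
--
--     def isEmpty(self):
--         return self.items == []
--
--     def peek(self):
--         return self.items(len(self.items)-1)
--
--     def size(self):
--         return len(self.items)
--
-- def offset(symbolString):
--     s = Stack()
--     index = 0
--     while index < len(symbolString):
--         symbol = symbolString[index]
--         if s.isEmpty():
--             s.push(symbol)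
--         else:
--             if symbol != s.items[-1]:
--                 s.push(symbol)
--             else:
--                 s.pop()
--         index += 1
--     return "".join(s.items)
-- ===== SOURCE B (Python) =====
-- def offset(symbolString):
--     # Fixpoint of one-pass adjacent-equal-pair deletion; confluence of the
--     # rewriting "xx -> ''" makes the normal form equal to the stack result.
--     s = list(symbolString)
--     while True:
--         t = one_pass(s)
--         if len(t) == len(s):
--             return "".join(s)
--         s = t
--
-- def one_pass(s):
--     out = []
--     i = 0
--     while i < len(s):
--         if i + 1 < len(s) and s[i] == s[i + 1]:
--             i += 2
--         else:
--             out.append(s[i])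
--             i += 1
--     return out
-- ===== Notes on version B (the rewrite author's own statement) =====
-- stated objective: alternative
-- what changed: Replaces the single left-to-right stack pass by a fixpoint loop that repeatedly scans the string deleting adjacent equal pairs until a pass changes nothing; equality of the two results rests on confluence of adjacent-pair deletion, proved in Lean.
import Mathlib
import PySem

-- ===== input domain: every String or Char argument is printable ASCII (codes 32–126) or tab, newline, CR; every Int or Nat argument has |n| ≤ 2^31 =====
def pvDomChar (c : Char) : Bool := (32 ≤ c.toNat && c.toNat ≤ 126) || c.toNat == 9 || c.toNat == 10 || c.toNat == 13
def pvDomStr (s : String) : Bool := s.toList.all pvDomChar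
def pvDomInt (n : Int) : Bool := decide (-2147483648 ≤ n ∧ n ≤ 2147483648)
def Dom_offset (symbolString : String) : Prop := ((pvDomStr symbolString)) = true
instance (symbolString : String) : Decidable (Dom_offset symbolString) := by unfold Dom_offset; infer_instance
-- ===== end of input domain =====

-- B replaces A's single stack pass by a fixpoint loop of whole-string passes deleting
-- adjacent equal pairs; equality of results is proved via confluence of pair deletion.


-- ===== PORT A =====
-- one iteration of A's while loop over 'items' (the stack, bottom to top):
-- push if empty, push if symbol differs from items[-1] (= getLast?), else pop
def offsetStep (items : List Char) (symbol : Char) : List Char :=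
  if items = [] then items ++ [symbol]
  else if some symbol ≠ items.getLast? then items ++ [symbol]
  else items.dropLast

def offset (symbolString : String) : String :=
  String.ofList (symbolString.toList.foldl offsetStep [])   -- "".join(s.items)

-- ===== PORT B =====
-- one_pass: the inner index loop (skip two on an adjacent equal pair, else keep one)
def onePass : List Char → List Char
  | [] => []
  | [c] => [c]
  | a :: b :: t => if a = b then onePass t else a :: onePass (b :: t)

-- needed by offsetLoop's termination proof
theorem onePass_length_le (l : List Char) : (onePass l).length ≤ l.length := by
  induction l using onePass.induct with
  | case1 => simp [onePass]
  | case2 c => simp [onePass]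
  | case3 b t ih => simp [onePass]; omega
  | case4 a b t hab ih =>
    rw [show onePass (a :: b :: t) = a :: onePass (b :: t) from by simp [onePass, hab]]
    simp only [List.length_cons] at ih ⊢
    omega

-- the 'while True' loop: repeat one_pass until a pass stops shrinking the list
def offsetLoop (s : List Char) : List Char :=
  if (onePass s).length = s.length then s else offsetLoop (onePass s)
termination_by s.length
decreasing_by
  have := onePass_length_le s
  omega

def offset_alt (symbolString : String) : String :=
  String.ofList (offsetLoop symbolString.toList)

-- ===== PRECONDITION & SPEC =====
def Spec_offset (symbolString : String) (out : String) : Prop := out = offset_alt symbolString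
instance (symbolString : String) (out : String) : Decidable (Spec_offset symbolString out) := by unfold Spec_offset; infer_instance

-- ===== CLAIM (what is proved, stated in full; the proofs are below) =====
def Claim_equal_offset : Prop := ∀ (symbolString : String), Dom_offset symbolString → Spec_offset symbolString (offset symbolString)

-- ===== LEMMAS AND PROOFS =====

-- cancel-cons: push c onto the reversed stack r (top at the front), cancelling with the top
def cc (c : Char) (r : List Char) : List Char :=
  match r with
  | [] => [c]
  | d :: t => if d = c then t else c :: d :: t

-- left reduction: A's stack run, in top-at-front representation
def redAux (r : List Char) (l : List Char) : List Char := l.foldl (fun r c => cc c r) r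

theorem redAux_cons (r : List Char) (c : Char) (l : List Char) :
    redAux r (c :: l) = redAux (cc c r) l := rfl

-- A's step is cc in the reversed representation
theorem offsetStep_eq (r : List Char) (c : Char) :
    offsetStep r.reverse c = (cc c r).reverse := by
  cases r with
  | nil => simp [offsetStep, cc]
  | cons d t =>
    have hrev : (d :: t).reverse = t.reverse ++ [d] := by simp
    by_cases h : d = c
    · subst h
      simp [offsetStep, cc, hrev]
    · have hcd : ¬ c = d := fun hc => h hc.symm
      have h' : ¬ some c = some d := by simpa using hcd
      simp [offsetStep, cc, hrev, h, h']

theorem foldl_offsetStep_eq (l : List Char) : ∀ r : List Char,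
    List.foldl offsetStep r.reverse l = (redAux r l).reverse := by
  induction l with
  | nil => intro r; rfl
  | cons c t ih =>
    intro r
    have : List.foldl offsetStep r.reverse (c :: t)
         = List.foldl offsetStep (cc c r).reverse t := by
      simp [List.foldl, offsetStep_eq]
    rw [this, ih (cc c r), redAux_cons]

-- cc preserves "no two adjacent equal characters"
theorem cc_isChain {r : List Char} (c : Char) (h : List.IsChain (· ≠ ·) r) :
    List.IsChain (· ≠ ·) (cc c r) := by
  cases r with
  | nil => simp [cc]
  | cons d t =>
    by_cases hd : d = c
    · simpa [cc, hd] using h.tail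
    · have hcd : c ≠ d := fun hc => hd hc.symm
      rw [show cc c (d :: t) = c :: d :: t from by simp [cc, hd],
          List.isChain_cons_cons]
      exact ⟨hcd, h⟩

-- on a reduced list, cc c is an involution
theorem cc_invol {r : List Char} (c : Char) (h : List.IsChain (· ≠ ·) r) :
    cc c (cc c r) = r := by
  cases r with
  | nil => simp [cc]
  | cons d t =>
    by_cases hd : d = c
    · subst hd
      cases t with
      | nil => simp [cc]
      | cons e u =>
        have hde : d ≠ e := (List.isChain_cons_cons.mp h).1
        have : ¬ e = d := fun he => hde he.symm
        simp [cc, this]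
    · simp [cc, hd]

-- one pass only performs cancellations: the stack run does not see them
theorem redAux_onePass (l : List Char) : ∀ r : List Char,
    List.IsChain (· ≠ ·) r → redAux r (onePass l) = redAux r l := by
  induction l using onePass.induct with
  | case1 => intro r _; rfl
  | case2 c => intro r _; rfl
  | case3 b t ih =>
    intro r hr
    rw [show onePass (b :: b :: t) = onePass t from by simp [onePass]]
    rw [ih r hr, redAux_cons, redAux_cons, cc_invol b hr]
  | case4 a b t hab ih =>
    intro r hr
    rw [show onePass (a :: b :: t) = a :: onePass (b :: t) from by simp [onePass, hab]]
    rw [redAux_cons, redAux_cons, ih (cc a r) (cc_isChain a hr)]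

-- if a pass does not shorten the list, the list was already reduced
theorem onePass_isChain_of_length (l : List Char) (h : (onePass l).length = l.length) :
    List.IsChain (· ≠ ·) l := by
  induction l using onePass.induct with
  | case1 => simp
  | case2 c => simp
  | case3 b t ih =>
    exfalso
    have := onePass_length_le t
    rw [show onePass (b :: b :: t) = onePass t from by simp [onePass]] at h
    simp at h
    omega
  | case4 a b t hab ih =>
    rw [show onePass (a :: b :: t) = a :: onePass (b :: t) from by simp [onePass, hab]] at h
    simp at h
    exact List.isChain_cons_cons.mpr ⟨hab, ih h⟩

-- the fixpoint loop: result is reduced and stack-run-equivalent to the input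
theorem offsetLoop_spec (s : List Char) :
    List.IsChain (· ≠ ·) (offsetLoop s) ∧ redAux [] (offsetLoop s) = redAux [] s := by
  induction s using offsetLoop.induct with
  | case1 s hlen =>
    rw [offsetLoop, if_pos hlen]
    exact ⟨onePass_isChain_of_length s hlen, rfl⟩
  | case2 s hlen ih =>
    rw [offsetLoop, if_neg hlen]
    exact ⟨ih.1, by rw [ih.2, redAux_onePass s [] (by simp)]⟩

-- the stack run of a reduced tail just reverses it onto the stack
theorem redAux_of_isChain (l : List Char) : ∀ r : List Char,
    List.IsChain (· ≠ ·) (r.reverse ++ l) → redAux r l = l.reverse ++ r := by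
  induction l with
  | nil => intro r _; simp [redAux]
  | cons c t ih =>
    intro r h
    rw [redAux_cons]
    cases r with
    | nil =>
      rw [show cc c [] = [c] from rfl, ih [c] (by simpa using h)]
      simp
    | cons d u =>
      have hdc : d ≠ c := by
        have h3 := List.isChain_append.mp h
        have := h3.2.2 d (by simp) c (by simp)
        exact this
      rw [show cc c (d :: u) = c :: d :: u from by
            simp [cc, hdc]]
      rw [ih (c :: d :: u) (by
            have : (c :: d :: u).reverse ++ t = (d :: u).reverse ++ c :: t := by simp
            rw [this]
            exact h)]
      simp

theorem offsetLoop_eq (s : List Char) : offsetLoop s = (redAux [] s).reverse := by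
  have h := offsetLoop_spec s
  have h2 : redAux [] (offsetLoop s) = (offsetLoop s).reverse := by
    simpa using redAux_of_isChain (offsetLoop s) [] (by simpa using h.1)
  rw [← h.2, h2, List.reverse_reverse]

-- ===== VERDICT (by name: the statement is the Claim_ definition above) =====
theorem offset_spec : Claim_equal_offset := by
  intro s _
  unfold Spec_offset offset offset_alt
  rw [offsetLoop_eq]
  rw [show List.foldl offsetStep [] s.toList
        = List.foldl offsetStep (List.reverse []) s.toList from rfl,
      foldl_offsetStep_eq s.toList []]
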